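-- pv_equiv track=rewrite | github.com/TNI-Cybersec/NCSA_Senior_Write_Up | WriteUp/Programming/challenge12.py | super_encode
-- ===== SOURCE A (Python) =====
-- def super_encode(flag):
--     old = 0
--     out = []
--     for f in flag:
--         new = (ord(f) + old) % 256
--         out.append(new)
--         old = ord(f)
--
--     return out
-- ===== SOURCE B (Python) =====
-- def super_encode(flag):
--     vals = [ord(f) for f in flag]
--     prev = [0] + vals[:-1]
--     return [(p + v) % 256 for p, v in zip(prev, vals)]
-- ===== Notes on version B (the rewrite author's own statement) =====
-- stated objective: alternative
-- what changed: Replaces the stateful accumulator loop (tracking the previous char in `old`) with a stateless pairing: materialize the code points, prefix a phantom 0 and drop the last to form the predecessor list, then zip the two aligned lists.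
import Mathlib
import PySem

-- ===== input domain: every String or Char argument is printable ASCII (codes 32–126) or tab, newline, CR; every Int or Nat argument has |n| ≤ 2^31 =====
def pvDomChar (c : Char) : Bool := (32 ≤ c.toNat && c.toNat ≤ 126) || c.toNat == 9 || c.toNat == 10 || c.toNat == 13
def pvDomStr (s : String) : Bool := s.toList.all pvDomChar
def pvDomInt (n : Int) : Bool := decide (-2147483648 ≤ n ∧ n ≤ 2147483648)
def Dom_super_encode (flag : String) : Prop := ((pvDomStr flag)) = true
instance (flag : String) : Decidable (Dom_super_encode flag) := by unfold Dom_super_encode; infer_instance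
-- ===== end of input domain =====

-- B replaces A's running-state loop with a zip of the value list against its 0-prefixed predecessor list; return value only.
-- ===== PORT A =====
def super_encode (flag : String) : List Int :=
  (flag.toList.foldl
    (fun (s : Int × List Int) f =>
      ((f.toNat : Int), s.2 ++ [PySem.Int.mod ((f.toNat : Int) + s.1) 256]))
    (0, [])).2

-- ===== PORT B =====
def super_encode_alt (flag : String) : List Int :=
  let vals := flag.toList.map (fun f => ((f.toNat : Int)))
  -- prev = [0] + vals[:-1]  (vals[:-1] is exactly List.dropLast)
  let prev := 0 :: vals.dropLast
  List.zipWith (fun p v => PySem.Int.mod (p + v) 256) prev vals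

-- ===== PRECONDITION & SPEC =====
def Spec_super_encode (flag : String) (out : List Int) : Prop := out = super_encode_alt flag
instance (flag : String) (out : List Int) : Decidable (Spec_super_encode flag out) := by unfold Spec_super_encode; infer_instance

-- ===== CLAIM (what is proved, stated in full; the proofs are below) =====
def Claim_equal_super_encode : Prop := ∀ (flag : String), Dom_super_encode flag → Spec_super_encode flag (super_encode flag)

-- ===== LEMMAS AND PROOFS =====

-- ===== VERDICT (by name: the statement is the Claim_ definition above) =====
theorem zipWith_cons_dropLast {α γ : Type} (g : α → α → γ) :
    ∀ (l : List α) (a : α), List.zipWith g (a :: l.dropLast) l = List.zipWith g (a :: l) l := by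
  intro l
  induction l with
  | nil => intro a; rfl
  | cons x xs ih =>
    intro a
    cases xs with
    | nil => rfl
    | cons y ys =>
      simp only [List.dropLast, List.zipWith, List.cons.injEq, true_and]
      have := ih x
      simpa [List.dropLast, List.zipWith] using this

theorem loop_eq (g : Int → Int → Int) :
    ∀ (l : List Char) (old : Int) (acc : List Int),
      (l.foldl (fun (s : Int × List Int) f =>
          ((f.toNat : Int), s.2 ++ [g (f.toNat : Int) s.1])) (old, acc)).2
      = acc ++ List.zipWith (fun p v => g v p)
          (old :: l.map (fun f => ((f.toNat : Int)))) (l.map (fun f => ((f.toNat : Int)))) := by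
  intro l
  induction l with
  | nil => intro old acc; simp
  | cons x xs ih =>
    intro old acc
    simp only [List.foldl_cons, List.map_cons, List.zipWith]
    rw [ih]
    simp

theorem super_encode_spec : Claim_equal_super_encode := by
  intro flag _
  unfold Spec_super_encode super_encode super_encode_alt
  rw [loop_eq (fun v p => PySem.Int.mod (v + p) 256) flag.toList 0 []]
  simp only [List.nil_append, Int.add_comm]
  exact (zipWith_cons_dropLast (fun p v => PySem.Int.mod (p + v) 256)
    (flag.toList.map (fun f => ((f.toNat : Int)))) 0).symm
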